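-- pv_equiv track=rewrite | github.com/Imaddindepf/tradeul | services/historical/polygon_data_loader.py | _map_sic_to_sector
-- ===== SOURCE A (Python) =====
-- from typing import Optional, List, Dict, Any
--
-- def _map_sic_to_sector(sic_description: Optional[str]) -> Optional[str]:
--     """
--     Mapea SIC description a sector general
--
--     Polygon usa SIC (Standard Industrial Classification)
--     Mapeamos a sectores comunes de trading
--     """
--     if not sic_description:
--         return None
--
--     sic_lower = sic_description.lower()
--
--     # Technology
--     if any(word in sic_lower for word in ["computer", "software", "electronic", "semiconductor", "technology"]):
--         return "Technology"
--
--     # Healthcare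
--     if any(word in sic_lower for word in ["pharmaceutical", "medical", "health", "biotechnology"]):
--         return "Healthcare"
--
--     # Financial
--     if any(word in sic_lower for word in ["bank", "insurance", "financial", "investment", "securities"]):
--         return "Financial Services"
--
--     # Energy
--     if any(word in sic_lower for word in ["oil", "gas", "energy", "petroleum", "coal"]):
--         return "Energy"
--
--     # Consumer
--     if any(word in sic_lower for word in ["retail", "consumer", "restaurant", "food", "beverage"]):
--         return "Consumer Cyclical"
--
--     # Industrial
--     if any(word in sic_lower for word in ["manufacturing", "industrial", "machinery", "equipment"]):
--         return "Industrials"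
--
--     # Real Estate
--     if any(word in sic_lower for word in ["real estate", "reit", "property"]):
--         return "Real Estate"
--
--     # Communication
--     if any(word in sic_lower for word in ["communication", "telecom", "media", "broadcasting"]):
--         return "Communication Services"
--
--     # Utilities
--     if any(word in sic_lower for word in ["utility", "electric", "water", "gas distribution"]):
--         return "Utilities"
--
--     # Materials
--     if any(word in sic_lower for word in ["mining", "metal", "chemical", "paper", "construction"]):
--         return "Basic Materials"
--
--     return "Other"
-- ===== SOURCE B (Python) =====
-- from typing import Optional
--
-- # Priority-ordered sector names; index = priority, last entry is the default.
-- _SECTORS = [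
--     "Technology", "Healthcare", "Financial Services", "Energy",
--     "Consumer Cyclical", "Industrials", "Real Estate",
--     "Communication Services", "Utilities", "Basic Materials", "Other",
-- ]
--
-- # Inverted index: keyword -> priority of its sector.
-- _KEYWORD_PRIORITY = {
--     "computer": 0, "software": 0, "electronic": 0, "semiconductor": 0, "technology": 0,
--     "pharmaceutical": 1, "medical": 1, "health": 1, "biotechnology": 1,
--     "bank": 2, "insurance": 2, "financial": 2, "investment": 2, "securities": 2,
--     "oil": 3, "gas": 3, "energy": 3, "petroleum": 3, "coal": 3,
--     "retail": 4, "consumer": 4, "restaurant": 4, "food": 4, "beverage": 4,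
--     "manufacturing": 5, "industrial": 5, "machinery": 5, "equipment": 5,
--     "real estate": 6, "reit": 6, "property": 6,
--     "communication": 7, "telecom": 7, "media": 7, "broadcasting": 7,
--     "utility": 8, "electric": 8, "water": 8, "gas distribution": 8,
--     "mining": 9, "metal": 9, "chemical": 9, "paper": 9, "construction": 9,
-- }
--
-- # Distinct keyword lengths, so each text position is probed once per length.
-- _LENGTHS = sorted({len(k) for k in _KEYWORD_PRIORITY})
--
--
-- def _scan_best(s: str) -> int:
--     """Single left-to-right scan: at each position look up the candidate
--     substrings (one per keyword length) in the inverted index and keep the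
--     best (smallest) priority seen."""
--     best = len(_SECTORS) - 1  # priority of "Other"
--     for i in range(len(s)):
--         for length in _LENGTHS:
--             p = _KEYWORD_PRIORITY.get(s[i : i + length])
--             if p is not None and p < best:
--                 best = p
--     return best
--
--
-- def _map_sic_to_sector(sic_description: Optional[str]) -> Optional[str]:
--     if not sic_description:
--         return None
--     return _SECTORS[_scan_best(sic_description.lower())]
-- ===== Notes on version B (the rewrite author's own statement) =====
-- stated objective: alternative
-- what changed: Instead of A's ten if-branches each scanning the whole string for every keyword, B builds an inverted keyword-to-priority dictionary and makes a single left-to-right scan of the text, probing one candidate substring per distinct keyword length at each position, keeping the minimum priority seen, and indexing a priority-ordered sector-name table whose last entry is the default.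
import Mathlib
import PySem

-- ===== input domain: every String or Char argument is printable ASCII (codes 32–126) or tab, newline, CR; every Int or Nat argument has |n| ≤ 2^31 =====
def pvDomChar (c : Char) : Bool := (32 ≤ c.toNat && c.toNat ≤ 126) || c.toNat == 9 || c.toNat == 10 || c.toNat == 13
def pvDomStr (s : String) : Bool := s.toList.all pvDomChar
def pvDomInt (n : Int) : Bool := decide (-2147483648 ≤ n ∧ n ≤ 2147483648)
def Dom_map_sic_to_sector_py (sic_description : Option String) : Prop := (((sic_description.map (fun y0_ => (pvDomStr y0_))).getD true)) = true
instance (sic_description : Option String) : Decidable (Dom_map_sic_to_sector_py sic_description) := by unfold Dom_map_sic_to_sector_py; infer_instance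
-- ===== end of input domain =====

-- B replaces A's ten-branch if-chain of 44 substring scans by a single left-to-right scan of the
-- text with an inverted keyword->priority index probed at each position (objective: alternative).


-- ===== PORT A =====
def map_sic_to_sector_py (sic_description : Option String) : Option String :=
  match sic_description with
  | none => none
  | some s =>
    if s = "" then none
    else
      let sic_lower := PySem.Str.lower s
      if ["computer", "software", "electronic", "semiconductor", "technology"].any (fun word => PySem.Str.isIn word sic_lower) then some "Technology"
      else if ["pharmaceutical", "medical", "health", "biotechnology"].any (fun word => PySem.Str.isIn word sic_lower) then some "Healthcare"
      else if ["bank", "insurance", "financial", "investment", "securities"].any (fun word => PySem.Str.isIn word sic_lower) then some "Financial Services"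
      else if ["oil", "gas", "energy", "petroleum", "coal"].any (fun word => PySem.Str.isIn word sic_lower) then some "Energy"
      else if ["retail", "consumer", "restaurant", "food", "beverage"].any (fun word => PySem.Str.isIn word sic_lower) then some "Consumer Cyclical"
      else if ["manufacturing", "industrial", "machinery", "equipment"].any (fun word => PySem.Str.isIn word sic_lower) then some "Industrials"
      else if ["real estate", "reit", "property"].any (fun word => PySem.Str.isIn word sic_lower) then some "Real Estate"
      else if ["communication", "telecom", "media", "broadcasting"].any (fun word => PySem.Str.isIn word sic_lower) then some "Communication Services"
      else if ["utility", "electric", "water", "gas distribution"].any (fun word => PySem.Str.isIn word sic_lower) then some "Utilities"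
      else if ["mining", "metal", "chemical", "paper", "construction"].any (fun word => PySem.Str.isIn word sic_lower) then some "Basic Materials"
      else some "Other"

-- ===== PORT B =====
-- B: priority-ordered sector names; index = priority, last entry is the default.
def pvSectors : List String :=
  ["Technology", "Healthcare", "Financial Services", "Energy",
   "Consumer Cyclical", "Industrials", "Real Estate",
   "Communication Services", "Utilities", "Basic Materials", "Other"]

-- Inverted index: keyword -> priority of its sector (a Python dict = association list).
def pvKeywordPriority : List (String × Int) :=
  [("computer", 0), ("software", 0), ("electronic", 0), ("semiconductor", 0), ("technology", 0),
   ("pharmaceutical", 1), ("medical", 1), ("health", 1), ("biotechnology", 1),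
   ("bank", 2), ("insurance", 2), ("financial", 2), ("investment", 2), ("securities", 2),
   ("oil", 3), ("gas", 3), ("energy", 3), ("petroleum", 3), ("coal", 3),
   ("retail", 4), ("consumer", 4), ("restaurant", 4), ("food", 4), ("beverage", 4),
   ("manufacturing", 5), ("industrial", 5), ("machinery", 5), ("equipment", 5),
   ("real estate", 6), ("reit", 6), ("property", 6),
   ("communication", 7), ("telecom", 7), ("media", 7), ("broadcasting", 7),
   ("utility", 8), ("electric", 8), ("water", 8), ("gas distribution", 8),
   ("mining", 9), ("metal", 9), ("chemical", 9), ("paper", 9), ("construction", 9)]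

-- sorted({len(k) for k in _KEYWORD_PRIORITY}): distinct keyword lengths, sorted.
def pvLengths : List Int :=
  PySem.List.sorted (PySem.Set.ofList (pvKeywordPriority.map (fun kv => PySem.Str.len kv.1))) (fun x => x)

-- _scan_best: single scan of the text; at each position probe one substring per keyword length.
def pvScanBest (t : String) : Int :=
  (PySem.List.pyRange 0 (PySem.Str.len t)).foldl
    (fun best i =>
      pvLengths.foldl
        (fun best len =>
          match List.lookup (PySem.Str.slice t (some i) (some (i + len))) pvKeywordPriority with
          | some p => if p < best then p else best
          | none => best)
        best)
    ((pvSectors.length : Int) - 1)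

-- _SECTORS[best]: exact here — 0 ≤ pvScanBest t ≤ 10 always (proved below), so the Python
-- indexing never raises and pyGetD's default is never used.
def map_sic_to_sector_py_alt (sic_description : Option String) : Option String :=
  match sic_description with
  | none => none
  | some s =>
    if s = "" then none
    else some (PySem.List.pyGetD pvSectors (pvScanBest (PySem.Str.lower s)) "")

-- ===== PRECONDITION & SPEC =====
def Spec_map_sic_to_sector_py (sic_description : Option String) (out : Option String) : Prop := out = map_sic_to_sector_py_alt sic_description
instance (sic_description : Option String) (out : Option String) : Decidable (Spec_map_sic_to_sector_py sic_description out) := by unfold Spec_map_sic_to_sector_py; infer_instance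

-- ===== CLAIM (what is proved, stated in full; the proofs are below) =====
def Claim_equal_map_sic_to_sector_py : Prop := ∀ (sic_description : Option String), Dom_map_sic_to_sector_py sic_description → Spec_map_sic_to_sector_py sic_description (map_sic_to_sector_py sic_description)

-- ===== LEMMAS AND PROOFS =====

-- A's keyword lists, in branch order (proof-side bookkeeping only).
def pvSectorKeywords : List (List String) :=
  [["computer", "software", "electronic", "semiconductor", "technology"],
   ["pharmaceutical", "medical", "health", "biotechnology"],
   ["bank", "insurance", "financial", "investment", "securities"],
   ["oil", "gas", "energy", "petroleum", "coal"],
   ["retail", "consumer", "restaurant", "food", "beverage"],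
   ["manufacturing", "industrial", "machinery", "equipment"],
   ["real estate", "reit", "property"],
   ["communication", "telecom", "media", "broadcasting"],
   ["utility", "electric", "water", "gas distribution"],
   ["mining", "metal", "chemical", "paper", "construction"]]

-- "branch j of A would fire on t"
def pvMatch (j : Int) (t : String) : Bool :=
  (pvSectorKeywords.getD j.toNat []).any (fun w => PySem.Str.isIn w t)

theorem pv_lookup_mem {α β : Type} [BEq α] [LawfulBEq α] (w : α) (p : β) (l : List (α × β))
    (h : List.lookup w l = some p) : (w, p) ∈ l := by
  induction l with
  | nil => simp at h
  | cons hd tl ih =>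
    obtain ⟨k, v⟩ := hd
    rw [List.lookup_cons] at h
    by_cases hw : w == k
    · simp [hw] at h; simp [(eq_of_beq hw).symm, h]
    · simp [hw] at h; exact List.mem_cons_of_mem _ (ih h)

-- every entry of the inverted index: priority in [0,10), its length is probed, key nonempty,
-- and a hit anywhere in t makes A's branch p fire.
set_option maxRecDepth 65536 in
theorem pvLengths_eq : pvLengths = [3, 4, 5, 6, 7, 8, 9, 10, 11, 12, 13, 14, 16] := by decide

set_option maxRecDepth 16384 in
theorem pv_kw_facts (w : String) (p : Int) (hm : (w, p) ∈ pvKeywordPriority) :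
    0 ≤ p ∧ p < 10 ∧ ((w.toList.length : Int)) ∈ pvLengths ∧ w.toList ≠ [] ∧
      w ∈ pvSectorKeywords.getD p.toNat [] := by
  rw [pvLengths_eq]
  have h : ∀ kv ∈ pvKeywordPriority, 0 ≤ kv.2 ∧ kv.2 < 10 ∧
      ((kv.1.toList.length : Int)) ∈ ([3, 4, 5, 6, 7, 8, 9, 10, 11, 12, 13, 14, 16] : List Int) ∧
      kv.1.toList ≠ [] ∧ kv.1 ∈ pvSectorKeywords.getD kv.2.toNat [] := by decide
  exact h (w, p) hm

-- slices with nonnegative bounds are infixes of the string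
theorem pv_slice_infix (t : String) (a b : Int) (ha : 0 ≤ a) (hb : 0 ≤ b) :
    (PySem.Str.slice t (some a) (some b)).toList <:+: t.toList := by
  rw [PySem.Str.toList_slice, PySem.Chars.slice_eq_listSlice, PySem.List.slice_toNat _ ha hb]
  exact ((List.take_prefix _ _).isInfix).trans (List.drop_suffix _ _).isInfix

-- generic fold facts
theorem pv_foldl_le_init {α : Type} (g : Int → α → Int) (hg : ∀ b x, g b x ≤ b) :
    ∀ (l : List α) (b : Int), List.foldl g b l ≤ b := by
  intro l
  induction l with
  | nil => intro b; simp
  | cons hd tl ih => intro b; exact le_trans (ih (g b hd)) (hg b hd)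

theorem pv_foldl_le_of_mem {α : Type} (g : Int → α → Int) (hg : ∀ b x, g b x ≤ b)
    (x : α) (v : Int) (hv : ∀ b, g b x ≤ v) :
    ∀ (l : List α), x ∈ l → ∀ b, List.foldl g b l ≤ v := by
  intro l
  induction l with
  | nil => intro h; simp at h
  | cons hd tl ih =>
    intro hmem b
    rcases List.mem_cons.mp hmem with h | h
    · subst h
      exact le_trans (pv_foldl_le_init g hg tl (g b x)) (hv b)
    · exact ih h (g b hd)

theorem pv_foldl_sound {α : Type} (g : Int → α → Int) (P : Int → Prop) (l : List α)
    (hstep : ∀ b x, x ∈ l → P b → P (g b x)) (b : Int) (hb : P b) : P (List.foldl g b l) := by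
  induction l generalizing b with
  | nil => simpa using hb
  | cons hd tl ih =>
    exact ih (fun b x hx hPb => hstep b x (List.mem_cons_of_mem _ hx) hPb)
      (g b hd) (hstep b hd (List.mem_cons_self) hb)

-- the inner fold's step and its two basic properties
theorem pv_inner_step_le (t : String) (i : Int) (b len : Int) :
    (match List.lookup (PySem.Str.slice t (some i) (some (i + len))) pvKeywordPriority with
     | some p => if p < b then p else b
     | none => b) ≤ b := by
  cases List.lookup (PySem.Str.slice t (some i) (some (i + len))) pvKeywordPriority with
  | none => exact le_refl b
  | some p => dsimp only; split_ifs with h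
              · exact le_of_lt h
              · exact le_refl b

theorem pv_outer_step_le (t : String) (b i : Int) :
    (pvLengths.foldl
        (fun best len =>
          match List.lookup (PySem.Str.slice t (some i) (some (i + len))) pvKeywordPriority with
          | some p => if p < best then p else best
          | none => best) b) ≤ b :=
  pv_foldl_le_init _ (fun b len => pv_inner_step_le t i b len) pvLengths b

-- upper bound: any keyword of the index occurring in t bounds pvScanBest by its priority
theorem pv_scan_le (t : String) (w : String) (p : Int)
    (hl : List.lookup w pvKeywordPriority = some p) (hin : PySem.Str.isIn w t = true) :
    pvScanBest t ≤ p := by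
  obtain ⟨_, _, hlen, hne, _⟩ := pv_kw_facts w p (pv_lookup_mem _ _ _ hl)
  rw [PySem.Str.isIn_eq] at hin
  obtain ⟨j, hj⟩ := (PySem.Chars.exists_prefix_drop_iff_isIn _ _).mpr hin
  have hjlt : j < t.toList.length := by
    apply List.length_lt_of_drop_ne_nil
    intro hnil
    rw [hnil] at hj
    exact hne (List.prefix_nil.mp hj)
  have hslice : PySem.Str.slice t (some (j : Int)) (some ((j : Int) + (w.toList.length : Int))) = w := by
    apply String.toList_inj.mp
    rw [PySem.Str.toList_slice, PySem.Chars.slice_eq_listSlice, PySem.List.slice_natCast_add]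
    exact (List.prefix_iff_eq_take.mp hj).symm
  unfold pvScanBest
  apply pv_foldl_le_of_mem _ (fun b i => pv_outer_step_le t b i) ((j : Int)) p
  · intro b
    apply pv_foldl_le_of_mem _ (fun b len => pv_inner_step_le t (j : Int) b len)
      ((w.toList.length : Int)) p _ pvLengths hlen
    intro b'
    rw [hslice, hl]
    dsimp only
    split_ifs with h
    · exact le_refl p
    · omega
  · exact PySem.List.mem_pyRange_one.mpr ⟨Int.natCast_nonneg j, by rw [PySem.Str.len_eq]; exact_mod_cast hjlt⟩

-- soundness: pvScanBest is 10 or the priority of a branch of A that fires on t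
theorem pv_scan_sound (t : String) :
    pvScanBest t = 10 ∨ (0 ≤ pvScanBest t ∧ pvScanBest t < 10 ∧ pvMatch (pvScanBest t) t = true) := by
  have key : ∀ b, (b = 10 ∨ (0 ≤ b ∧ b < 10 ∧ pvMatch b t = true)) →
      (pvScanBest t = b → pvScanBest t = 10 ∨ (0 ≤ pvScanBest t ∧ pvScanBest t < 10 ∧ pvMatch (pvScanBest t) t = true)) := by
    intro b hb heq
    rw [heq]
    exact hb
  apply key _ _ rfl
  unfold pvScanBest
  apply pv_foldl_sound _ (fun b => b = 10 ∨ (0 ≤ b ∧ b < 10 ∧ pvMatch b t = true))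
  · intro b i hi hPb
    apply pv_foldl_sound _ (fun b => b = 10 ∨ (0 ≤ b ∧ b < 10 ∧ pvMatch b t = true)) pvLengths _ b hPb
    intro b' len hlen hPb'
    cases hlk : List.lookup (PySem.Str.slice t (some i) (some (i + len))) pvKeywordPriority with
    | none => simpa using hPb'
    | some p =>
      dsimp only
      split_ifs with hp
      · obtain ⟨hp0, hp9, _, _, hkmem⟩ := pv_kw_facts _ p (pv_lookup_mem _ _ _ hlk)
        have hi0 : 0 ≤ i := (PySem.List.mem_pyRange_one.mp hi).1
        have hlen0 : 0 ≤ len := by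
          rw [pvLengths_eq] at hlen
          have hall : ∀ x ∈ ([3, 4, 5, 6, 7, 8, 9, 10, 11, 12, 13, 14, 16] : List Int), (0 : Int) ≤ x := by decide
          exact hall len hlen
        have hin : PySem.Str.isIn (PySem.Str.slice t (some i) (some (i + len))) t = true := by
          rw [PySem.Str.isIn_eq]
          exact (PySem.Chars.isIn_iff_infix _ _).mpr (pv_slice_infix t i (i + len) hi0 (by omega))
        refine Or.inr ⟨hp0, hp9, ?_⟩
        unfold pvMatch
        exact List.any_eq_true.mpr ⟨_, hkmem, hin⟩
      · exact hPb'
  · norm_num [pvSectors]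

-- pin the scan result: at most k, and no branch before k fires, forces exactly k
theorem pv_scan_pin (t : String) (k : Int) (hk0 : 0 ≤ k) (hk : k ≤ 10)
    (hle : pvScanBest t ≤ k) (hlt : ∀ j : Int, 0 ≤ j → j < k → pvMatch j t = false) :
    pvScanBest t = k := by
  rcases pv_scan_sound t with h10 | ⟨h0, h9, hM⟩
  · omega
  · by_cases hlt' : pvScanBest t < k
    · exact absurd hM (by simp [hlt (pvScanBest t) h0 hlt'])
    · omega

-- ===== VERDICT (by name: the statement is the Claim_ definition above) =====
set_option maxHeartbeats 4000000 in
set_option maxRecDepth 65536 in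
theorem map_sic_to_sector_py_spec : Claim_equal_map_sic_to_sector_py := by
  intro sic_description _
  unfold Spec_map_sic_to_sector_py
  cases sic_description with
  | none => rfl
  | some s =>
    by_cases hs : s = ""
    · simp [map_sic_to_sector_py, map_sic_to_sector_py_alt, hs]
    · simp only [map_sic_to_sector_py, map_sic_to_sector_py_alt, if_neg hs]
      split_ifs with h0 h1 h2 h3 h4 h5 h6 h7 h8 h9
      · have hle : pvScanBest (PySem.Str.lower s) ≤ (0 : Int) := by
          rcases List.any_eq_true.mp h0 with ⟨w, hw, hin⟩
          fin_cases hw <;> exact pv_scan_le _ _ _ (by decide) hin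
        rw [pv_scan_pin _ 0 (by norm_num) (by norm_num) hle ?_]
        · rfl
        · intro j hj0 hjk
          interval_cases j
      · have hle : pvScanBest (PySem.Str.lower s) ≤ (1 : Int) := by
          rcases List.any_eq_true.mp h1 with ⟨w, hw, hin⟩
          fin_cases hw <;> exact pv_scan_le _ _ _ (by decide) hin
        rw [pv_scan_pin _ 1 (by norm_num) (by norm_num) hle ?_]
        · rfl
        · intro j hj0 hjk
          interval_cases j
          · simpa [pvMatch, pvSectorKeywords] using h0
      · have hle : pvScanBest (PySem.Str.lower s) ≤ (2 : Int) := by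
          rcases List.any_eq_true.mp h2 with ⟨w, hw, hin⟩
          fin_cases hw <;> exact pv_scan_le _ _ _ (by decide) hin
        rw [pv_scan_pin _ 2 (by norm_num) (by norm_num) hle ?_]
        · rfl
        · intro j hj0 hjk
          interval_cases j
          · simpa [pvMatch, pvSectorKeywords] using h0
          · simpa [pvMatch, pvSectorKeywords] using h1
      · have hle : pvScanBest (PySem.Str.lower s) ≤ (3 : Int) := by
          rcases List.any_eq_true.mp h3 with ⟨w, hw, hin⟩
          fin_cases hw <;> exact pv_scan_le _ _ _ (by decide) hin
        rw [pv_scan_pin _ 3 (by norm_num) (by norm_num) hle ?_]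
        · rfl
        · intro j hj0 hjk
          interval_cases j
          · simpa [pvMatch, pvSectorKeywords] using h0
          · simpa [pvMatch, pvSectorKeywords] using h1
          · simpa [pvMatch, pvSectorKeywords] using h2
      · have hle : pvScanBest (PySem.Str.lower s) ≤ (4 : Int) := by
          rcases List.any_eq_true.mp h4 with ⟨w, hw, hin⟩
          fin_cases hw <;> exact pv_scan_le _ _ _ (by decide) hin
        rw [pv_scan_pin _ 4 (by norm_num) (by norm_num) hle ?_]
        · rfl
        · intro j hj0 hjk
          interval_cases j
          · simpa [pvMatch, pvSectorKeywords] using h0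
          · simpa [pvMatch, pvSectorKeywords] using h1
          · simpa [pvMatch, pvSectorKeywords] using h2
          · simpa [pvMatch, pvSectorKeywords] using h3
      · have hle : pvScanBest (PySem.Str.lower s) ≤ (5 : Int) := by
          rcases List.any_eq_true.mp h5 with ⟨w, hw, hin⟩
          fin_cases hw <;> exact pv_scan_le _ _ _ (by decide) hin
        rw [pv_scan_pin _ 5 (by norm_num) (by norm_num) hle ?_]
        · rfl
        · intro j hj0 hjk
          interval_cases j
          · simpa [pvMatch, pvSectorKeywords] using h0
          · simpa [pvMatch, pvSectorKeywords] using h1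
          · simpa [pvMatch, pvSectorKeywords] using h2
          · simpa [pvMatch, pvSectorKeywords] using h3
          · simpa [pvMatch, pvSectorKeywords] using h4
      · have hle : pvScanBest (PySem.Str.lower s) ≤ (6 : Int) := by
          rcases List.any_eq_true.mp h6 with ⟨w, hw, hin⟩
          fin_cases hw <;> exact pv_scan_le _ _ _ (by decide) hin
        rw [pv_scan_pin _ 6 (by norm_num) (by norm_num) hle ?_]
        · rfl
        · intro j hj0 hjk
          interval_cases j
          · simpa [pvMatch, pvSectorKeywords] using h0
          · simpa [pvMatch, pvSectorKeywords] using h1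
          · simpa [pvMatch, pvSectorKeywords] using h2
          · simpa [pvMatch, pvSectorKeywords] using h3
          · simpa [pvMatch, pvSectorKeywords] using h4
          · simpa [pvMatch, pvSectorKeywords] using h5
      · have hle : pvScanBest (PySem.Str.lower s) ≤ (7 : Int) := by
          rcases List.any_eq_true.mp h7 with ⟨w, hw, hin⟩
          fin_cases hw <;> exact pv_scan_le _ _ _ (by decide) hin
        rw [pv_scan_pin _ 7 (by norm_num) (by norm_num) hle ?_]
        · rfl
        · intro j hj0 hjk
          interval_cases j
          · simpa [pvMatch, pvSectorKeywords] using h0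
          · simpa [pvMatch, pvSectorKeywords] using h1
          · simpa [pvMatch, pvSectorKeywords] using h2
          · simpa [pvMatch, pvSectorKeywords] using h3
          · simpa [pvMatch, pvSectorKeywords] using h4
          · simpa [pvMatch, pvSectorKeywords] using h5
          · simpa [pvMatch, pvSectorKeywords] using h6
      · have hle : pvScanBest (PySem.Str.lower s) ≤ (8 : Int) := by
          rcases List.any_eq_true.mp h8 with ⟨w, hw, hin⟩
          fin_cases hw <;> exact pv_scan_le _ _ _ (by decide) hin
        rw [pv_scan_pin _ 8 (by norm_num) (by norm_num) hle ?_]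
        · rfl
        · intro j hj0 hjk
          interval_cases j
          · simpa [pvMatch, pvSectorKeywords] using h0
          · simpa [pvMatch, pvSectorKeywords] using h1
          · simpa [pvMatch, pvSectorKeywords] using h2
          · simpa [pvMatch, pvSectorKeywords] using h3
          · simpa [pvMatch, pvSectorKeywords] using h4
          · simpa [pvMatch, pvSectorKeywords] using h5
          · simpa [pvMatch, pvSectorKeywords] using h6
          · simpa [pvMatch, pvSectorKeywords] using h7
      · have hle : pvScanBest (PySem.Str.lower s) ≤ (9 : Int) := by
          rcases List.any_eq_true.mp h9 with ⟨w, hw, hin⟩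
          fin_cases hw <;> exact pv_scan_le _ _ _ (by decide) hin
        rw [pv_scan_pin _ 9 (by norm_num) (by norm_num) hle ?_]
        · rfl
        · intro j hj0 hjk
          interval_cases j
          · simpa [pvMatch, pvSectorKeywords] using h0
          · simpa [pvMatch, pvSectorKeywords] using h1
          · simpa [pvMatch, pvSectorKeywords] using h2
          · simpa [pvMatch, pvSectorKeywords] using h3
          · simpa [pvMatch, pvSectorKeywords] using h4
          · simpa [pvMatch, pvSectorKeywords] using h5
          · simpa [pvMatch, pvSectorKeywords] using h6
          · simpa [pvMatch, pvSectorKeywords] using h7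
          · simpa [pvMatch, pvSectorKeywords] using h8
      · have hle : pvScanBest (PySem.Str.lower s) ≤ (10 : Int) := by
          unfold pvScanBest
          refine le_trans (pv_foldl_le_init _ (fun b i => pv_outer_step_le _ b i) _ _) ?_
          norm_num [pvSectors]
        rw [pv_scan_pin _ 10 (by norm_num) (by norm_num) hle ?_]
        · rfl
        · intro j hj0 hjk
          interval_cases j
          · simpa [pvMatch, pvSectorKeywords] using h0
          · simpa [pvMatch, pvSectorKeywords] using h1
          · simpa [pvMatch, pvSectorKeywords] using h2
          · simpa [pvMatch, pvSectorKeywords] using h3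
          · simpa [pvMatch, pvSectorKeywords] using h4
          · simpa [pvMatch, pvSectorKeywords] using h5
          · simpa [pvMatch, pvSectorKeywords] using h6
          · simpa [pvMatch, pvSectorKeywords] using h7
          · simpa [pvMatch, pvSectorKeywords] using h8
          · simpa [pvMatch, pvSectorKeywords] using h9
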